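-- pv_equiv track=rewrite | github.com/nicofucci/deco | agent_runtime/jarvis_api/app/agents/advanced/recon_advanced.py | _parse_service_info
-- ===== SOURCE A (Python) =====
-- from typing import Dict, List, Any, Optional
--
-- def _parse_service_info(output: str) -> Dict[str, str]:
--     """Parsea información de servicio."""
--     info = {
--         "service": "unknown",
--         "version": "unknown"
--     }
--
--     for line in output.split("\n"):
--         if "Service Info:" in line:
--             info["service"] = line.split("Service Info:")[1].strip()
--         elif "Version:" in line:
--             info["version"] = line.split("Version:")[1].strip()
--
--     return info
-- ===== SOURCE B (Python) =====
-- def _parse_service_info(output: str):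
--     """Reverse scan with found-flags and early exit; last match wins as in A."""
--     service = "unknown"
--     version = "unknown"
--     sfound = False
--     vfound = False
--     for line in reversed(output.split("\n")):
--         if sfound and vfound:
--             break
--         if "Service Info:" in line:
--             if not sfound:
--                 service = line.split("Service Info:")[1].strip()
--                 sfound = True
--         elif "Version:" in line:
--             if not vfound:
--                 version = line.split("Version:")[1].strip()
--                 vfound = True
--     return {"service": service, "version": version}
-- ===== Notes on version B (the rewrite author's own statement) =====
-- stated objective: alternative
-- what changed: B scans the split lines in reverse with found-flags and stops as soon as both fields are set (first match in reverse = A's last-match-wins), instead of A's forward loop that overwrites a dict on every matching line.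
import Mathlib
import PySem

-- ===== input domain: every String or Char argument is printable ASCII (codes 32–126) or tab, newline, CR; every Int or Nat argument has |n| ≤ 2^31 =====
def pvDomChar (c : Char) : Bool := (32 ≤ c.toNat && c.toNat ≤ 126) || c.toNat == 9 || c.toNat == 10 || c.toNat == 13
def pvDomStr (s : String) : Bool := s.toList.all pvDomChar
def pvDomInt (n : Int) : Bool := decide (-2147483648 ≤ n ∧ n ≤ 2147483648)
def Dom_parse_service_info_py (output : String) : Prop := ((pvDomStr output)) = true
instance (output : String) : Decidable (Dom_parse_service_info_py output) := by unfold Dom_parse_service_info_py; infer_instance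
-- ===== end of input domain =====

-- B scans the split lines in reverse with found-flags and early exit instead of A's forward overwrite loop; proved to return the same dict.


-- shared helper: line.split(sep)[1].strip(); the [1] is always in range where used
-- (both programs only call it when sep occurs in line, so split has ≥ 2 parts), hence getD "" is never taken.
def pvExtract (line sep : String) : String :=
  PySem.Str.strip ((PySem.List.pyGet? ((PySem.Str.split? line sep).getD []) 1).getD "")

-- ===== PORT A =====
def pvA_step (info : PySem.Dict String String) (line : String) : PySem.Dict String String :=
  if PySem.Str.isIn "Service Info:" line then
    info.insert "service" (pvExtract line "Service Info:")
  else if PySem.Str.isIn "Version:" line then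
    info.insert "version" (pvExtract line "Version:")
  else info

def parse_service_info_py (output : String) : List (String × String) :=
  let info : PySem.Dict String String :=
    (PySem.Dict.empty.insert "service" "unknown").insert "version" "unknown"
  ((((PySem.Str.split? output "\n").getD [])).foldl pvA_step info).items

-- ===== PORT B =====
def pvB_go : List String → Bool → Bool → String → String → (String × String)
  | [], _, _, s, v => (s, v)
  | line :: rest, sf, vf, s, v =>
    if sf && vf then (s, v)
    else if PySem.Str.isIn "Service Info:" line then
      if sf then pvB_go rest sf vf s v
      else pvB_go rest true vf (pvExtract line "Service Info:") v
    else if PySem.Str.isIn "Version:" line then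
      if vf then pvB_go rest sf vf s v
      else pvB_go rest sf true s (pvExtract line "Version:")
    else pvB_go rest sf vf s v

def parse_service_info_py_alt (output : String) : List (String × String) :=
  let p := pvB_go (((PySem.Str.split? output "\n").getD [])).reverse false false "unknown" "unknown"
  [("service", p.1), ("version", p.2)]

-- ===== PRECONDITION & SPEC =====
def Spec_parse_service_info_py (output : String) (out : List (String × String)) : Prop := out = parse_service_info_py_alt output
instance (output : String) (out : List (String × String)) : Decidable (Spec_parse_service_info_py output out) := by unfold Spec_parse_service_info_py; infer_instance

-- ===== CLAIM (what is proved, stated in full; the proofs are below) =====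
def Claim_equal_parse_service_info_py : Prop := ∀ (output : String), Dom_parse_service_info_py output → Spec_parse_service_info_py output (parse_service_info_py output)

-- ===== LEMMAS AND PROOFS =====

-- A's loop on the bare (service, version) pair
def pvPair_step (p : String × String) (line : String) : String × String :=
  if PySem.Str.isIn "Service Info:" line then (pvExtract line "Service Info:", p.2)
  else if PySem.Str.isIn "Version:" line then (p.1, pvExtract line "Version:")
  else p

theorem pvPair_fst_indep (L : List String) (s v v' : String) :
    (L.foldl pvPair_step (s, v)).1 = (L.foldl pvPair_step (s, v')).1 := by
  induction L generalizing s v v' with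
  | nil => rfl
  | cons l L ih =>
    simp only [List.foldl, pvPair_step]
    split_ifs <;> exact ih _ _ _

theorem pvPair_snd_indep (L : List String) (s s' v : String) :
    (L.foldl pvPair_step (s, v)).2 = (L.foldl pvPair_step (s', v)).2 := by
  induction L generalizing s s' v with
  | nil => rfl
  | cons l L ih =>
    simp only [List.foldl, pvPair_step]
    split_ifs <;> exact ih _ _ _

-- A's dict loop tracked by the pair loop
theorem pvA_dict (L : List String) (s v : String) :
    L.foldl pvA_step (PySem.Dict.mk [("service", s), ("version", v)]) =
      PySem.Dict.mk [("service", (L.foldl pvPair_step (s, v)).1),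
                     ("version", (L.foldl pvPair_step (s, v)).2)] := by
  induction L generalizing s v with
  | nil => rfl
  | cons l L ih =>
    simp only [List.foldl, pvA_step, pvPair_step]
    split_ifs with h1 h2
    · have : (PySem.Dict.mk [("service", s), ("version", v)]).insert "service"
          (pvExtract l "Service Info:") =
          PySem.Dict.mk [("service", pvExtract l "Service Info:"), ("version", v)] := by
        simp [PySem.Dict.insert, PySem.Dict.contains, PySem.Dict.items]
      rw [this, ih]
    · have : (PySem.Dict.mk [("service", s), ("version", v)]).insert "version"
          (pvExtract l "Version:") =
          PySem.Dict.mk [("service", s), ("version", pvExtract l "Version:")] := by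
        simp [PySem.Dict.insert, PySem.Dict.contains, PySem.Dict.items]
      rw [this, ih]
    · exact ih s v

-- B's reverse scan computes A's forward fold
set_option maxHeartbeats 1000000 in
theorem pvB_go_eq (R : List String) (sf vf : Bool) (s v : String) :
    pvB_go R sf vf s v =
      ((if sf then s else (R.reverse.foldl pvPair_step (s, v)).1),
       (if vf then v else (R.reverse.foldl pvPair_step (s, v)).2)) := by
  induction R generalizing sf vf s v with
  | nil => cases sf <;> cases vf <;> rfl
  | cons l R ih =>
    simp only [pvB_go, List.reverse_cons, List.foldl_append, List.foldl]
    by_cases hS : PySem.Str.isIn "Service Info:" l = true <;>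
      by_cases hV : PySem.Str.isIn "Version:" l = true <;>
      cases sf <;> cases vf <;>
      simp only [pvPair_step, hS, hV, ih, if_true, if_false, Bool.false_and, Bool.true_and,
        Bool.and_false, Bool.and_true, Bool.false_eq_true, Bool.true_eq_false,
        ite_true, ite_false, Prod.mk.injEq, true_and, and_true, and_self] <;>
      first
        | exact pvPair_snd_indep R.reverse _ _ _
        | exact pvPair_fst_indep R.reverse _ _ _

-- ===== VERDICT (by name: the statement is the Claim_ definition above) =====
theorem parse_service_info_py_spec : Claim_equal_parse_service_info_py := by
  intro output _
  show (((PySem.Str.split? output "\n").getD []).foldl pvA_step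
      ((PySem.Dict.empty.insert "service" "unknown").insert "version" "unknown")).items =
    [("service", (pvB_go ((PySem.Str.split? output "\n").getD []).reverse false false "unknown" "unknown").1),
     ("version", (pvB_go ((PySem.Str.split? output "\n").getD []).reverse false false "unknown" "unknown").2)]
  have hinit : (PySem.Dict.empty.insert "service" "unknown").insert "version" "unknown" =
      PySem.Dict.mk [("service", "unknown"), ("version", "unknown")] := by decide
  rw [hinit, pvA_dict, pvB_go_eq, List.reverse_reverse]
  rfl
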